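-- pv_equiv track=rewrite | github.com/MoseleyBioinformaticsLab/md_harmonize | MDH/KEGG_parser.py | get_center_list
-- ===== SOURCE A (Python) =====
-- def get_center_list(center_atom_index):
--     """
--     To generate all the combinations of reaction centers.
--
--     :param center_atom_index: list of atom index list for each reaction centers. eg: three reaction centers:
--     [[0, 1, 2], [5, 6], [10, 11]].
--     :type center_atom_index: :py:class:`list`.
--     :return: the list of combined reaction centers. eg: [[0, 5, 10], [0, 5, 11], [0, 6, 10], [0, 6, 11], [1, 5, 10],
--     [1, 5, 11], [1, 6, 10], [1, 6, 11], [2, 5, 10], [2, 5, 11], [2, 6, 10], [2, 6, 11]]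
--     :rtype: :py:class:`list`.
--     """
--     combines = []
--     def dfs(i, seen):
--         if i == len(center_atom_index):
--             combines.append(list(seen))
--             return
--         for idx in center_atom_index[i]:
--             if idx not in seen:
--                 seen.append(idx)
--                 dfs(i+1, seen)
--                 seen.pop()
--     dfs(0, [])
--     return combines
-- ===== SOURCE B (Python) =====
-- import itertools
--
-- def get_center_list(center_atom_index):
--     combines = []
--     for c in itertools.product(*center_atom_index):
--         if len(set(c)) == len(c):
--             combines.append(list(c))
--     return combines
-- ===== Notes on version B (the rewrite author's own statement) =====
-- stated objective: idiomatic
-- what changed: Replaced the recursive DFS with path-membership pruning by itertools.product over the center lists followed by an all-distinct filter (len(set(c)) == len(c)).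
import Mathlib
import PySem

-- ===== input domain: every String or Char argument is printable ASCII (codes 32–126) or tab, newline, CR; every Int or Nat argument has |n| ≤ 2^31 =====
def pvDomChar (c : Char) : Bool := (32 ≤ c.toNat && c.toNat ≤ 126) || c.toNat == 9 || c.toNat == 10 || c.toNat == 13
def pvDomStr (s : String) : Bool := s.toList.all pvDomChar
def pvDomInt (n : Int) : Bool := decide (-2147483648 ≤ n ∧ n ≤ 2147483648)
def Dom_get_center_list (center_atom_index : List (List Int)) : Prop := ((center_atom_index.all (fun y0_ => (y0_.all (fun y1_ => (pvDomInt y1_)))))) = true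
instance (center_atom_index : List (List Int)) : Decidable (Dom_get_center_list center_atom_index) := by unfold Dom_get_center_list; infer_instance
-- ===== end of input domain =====

-- B replaces A's pruning DFS by a cartesian product followed by an all-distinct filter (idiomatic, same cost).

-- ===== PORT A =====
-- A's inner dfs: remaining center lists + the 'seen' path; at the end the whole path is appended.
def get_center_list_dfs : List (List Int) → List Int → List (List Int)
  | [], seen => [seen]
  | l :: rest, seen =>
      l.foldl (fun acc idx =>
        if idx ∈ seen then acc else acc ++ get_center_list_dfs rest (seen ++ [idx])) []

def get_center_list (center_atom_index : List (List Int)) : List (List Int) :=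
  get_center_list_dfs center_atom_index []

-- ===== PORT B =====
-- itertools.product(*lists), leftmost slowest
def pvProduct : List (List Int) → List (List Int)
  | [] => [[]]
  | l :: rest => l.flatMap (fun x => (pvProduct rest).map (fun t => x :: t))

-- Source B: keep the tuples whose elements are pairwise distinct (len(set(c)) == len(c))
def get_center_list_alt (center_atom_index : List (List Int)) : List (List Int) :=
  (pvProduct center_atom_index).filter (fun c => c.Nodup)

-- ===== PRECONDITION & SPEC =====
def Spec_get_center_list (center_atom_index : List (List Int)) (out : List (List Int)) : Prop := out = get_center_list_alt center_atom_index
instance (center_atom_index : List (List Int)) (out : List (List Int)) : Decidable (Spec_get_center_list center_atom_index out) := by unfold Spec_get_center_list; infer_instance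

-- ===== CLAIM (what is proved, stated in full; the proofs are below) =====
def Claim_equal_get_center_list : Prop := ∀ (center_atom_index : List (List Int)), Dom_get_center_list center_atom_index → Spec_get_center_list center_atom_index (get_center_list center_atom_index)

-- ===== LEMMAS AND PROOFS =====

-- the DFS on (ls, seen) enumerates exactly the product tuples that keep seen ++ tuple duplicate-free
theorem dfs_eq_filter : ∀ (ls : List (List Int)) (seen : List Int), seen.Nodup →
    get_center_list_dfs ls seen
      = ((pvProduct ls).filter (fun c => (seen ++ c).Nodup)).map (fun c => seen ++ c) := by
  intro ls
  induction ls with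
  | nil =>
      intro seen hs
      simp [get_center_list_dfs, pvProduct, hs]
  | cons l rest ih =>
      intro seen hs
      rw [get_center_list_dfs]
      have hbody : (fun (acc : List (List Int)) idx =>
            if idx ∈ seen then acc else acc ++ get_center_list_dfs rest (seen ++ [idx]))
          = fun acc idx => acc ++ (if idx ∈ seen then [] else get_center_list_dfs rest (seen ++ [idx])) := by
        funext acc idx; by_cases hx : idx ∈ seen <;> simp [hx]
      rw [hbody, PySem.List.foldl_append_eq_flatMap]
      · simp only [pvProduct, List.filter_flatMap, List.map_flatMap, List.nil_append]
        apply List.flatMap_congr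
        intro x _
        by_cases hx : x ∈ seen
        · rw [if_pos hx]
          have hfalse : ∀ t ∈ pvProduct rest,
              ¬ ((fun c => decide ((seen ++ c).Nodup)) ∘ (fun t => x :: t)) t = true := by
            intro t _ h
            have hnd : (seen ++ x :: t).Nodup := of_decide_eq_true h
            exact (List.nodup_append.mp hnd).2.2 x hx x (by simp) rfl
          rw [List.filter_map, List.filter_eq_nil_iff.mpr hfalse, List.map_nil, List.map_nil]
        · rw [if_neg hx]
          have hnod : (seen ++ [x]).Nodup := by
            rw [List.nodup_append]
            refine ⟨hs, List.nodup_singleton x, ?_⟩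
            intro a ha b hb heq
            rw [List.mem_singleton] at hb
            exact hx (hb ▸ heq ▸ ha)
          rw [ih (seen ++ [x]) hnod, List.filter_map, List.map_map]
          have h1 : ((fun c => decide ((seen ++ c).Nodup)) ∘ (fun t => x :: t))
              = (fun c => decide ((seen ++ [x] ++ c).Nodup)) := by
            funext t; simp [Function.comp]
          have h2 : ((fun c => seen ++ c) ∘ (fun t => x :: t))
              = (fun c => seen ++ [x] ++ c) := by
            funext t; simp [Function.comp]
          rw [h1, h2]

-- ===== VERDICT (by name: the statement is the Claim_ definition above) =====
theorem get_center_list_spec : Claim_equal_get_center_list := by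
  intro cai _
  unfold Spec_get_center_list get_center_list get_center_list_alt
  rw [dfs_eq_filter cai [] List.nodup_nil]
  simp only [List.nil_append, List.map_id']
  rfl
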